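-- pv_equiv track=rewrite | github.com/avast/PurpleDome | app/metasploit.py | filter_ps_results
-- ===== SOURCE A (Python) =====
-- def filter_ps_results(data, user=None, name=None, arch=None):
--     """  Filter the process lists for certain
--
--     @param user: The user to filter for.
--     @param name: The process name to filter for (executable name)
--     @param arch: The architecture to select. 'x64' is one option
--     """
--
--     res = data
--     if user is not None:
--         res = [item for item in res if item["User"] == user]
--     if name is not None:
--         res = [item for item in res if item["Name"].lower() == name.lower()]
--     if arch is not None:
--         res = [item for item in res if item["Arch"] == arch]
--     return res
-- ===== SOURCE B (Python) =====
-- def filter_ps_results(data, user=None, name=None, arch=None):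
--     """Table-driven re-implementation: the active filters are reified as a
--     criteria table (key, lowercase?, target), then one accumulator loop keeps
--     each item iff it satisfies every criterion (checked in table order)."""
--     criteria = []
--     if user is not None:
--         criteria.append(("User", False, user))
--     if name is not None:
--         criteria.append(("Name", True, name.lower()))
--     if arch is not None:
--         criteria.append(("Arch", False, arch))
--     out = []
--     for item in data:
--         if all((item[key].lower() if low else item[key]) == target
--                for key, low, target in criteria):
--             out.append(item)
--     return out
-- ===== Notes on version B (the rewrite author's own statement) =====
-- stated objective: alternative
-- what changed: Replaces A's chain of three conditional filtering passes by a data-driven design: the active filters are first reified into a criteria table (key, lowercase-flag, target), then one accumulator loop keeps each item iff it satisfies every table entry.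
import Mathlib
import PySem

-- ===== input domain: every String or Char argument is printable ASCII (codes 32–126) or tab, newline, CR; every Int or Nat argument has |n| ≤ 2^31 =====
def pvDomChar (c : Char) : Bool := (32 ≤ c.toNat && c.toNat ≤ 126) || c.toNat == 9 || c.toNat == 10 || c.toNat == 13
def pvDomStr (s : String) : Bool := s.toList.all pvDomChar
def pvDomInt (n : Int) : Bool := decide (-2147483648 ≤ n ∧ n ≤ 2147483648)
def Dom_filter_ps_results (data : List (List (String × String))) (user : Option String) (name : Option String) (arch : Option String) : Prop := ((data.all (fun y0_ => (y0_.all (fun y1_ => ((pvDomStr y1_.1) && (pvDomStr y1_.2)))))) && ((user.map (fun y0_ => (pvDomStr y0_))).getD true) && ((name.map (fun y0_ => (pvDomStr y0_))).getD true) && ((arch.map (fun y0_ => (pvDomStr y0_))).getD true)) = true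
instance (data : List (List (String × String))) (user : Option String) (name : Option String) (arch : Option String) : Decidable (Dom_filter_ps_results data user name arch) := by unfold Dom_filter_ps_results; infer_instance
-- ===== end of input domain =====

-- B reifies the active filters into a criteria table and runs one accumulator
-- loop checking the whole table per item, instead of A's chain of conditional
-- filtering passes (objective: alternative, data-driven design).

-- ===== PORT A =====
-- A: res = data; then up to three list comprehensions, each rebuilding res.
def filter_ps_results (data : List (List (String × String))) (user : Option String) (name : Option String) (arch : Option String) : List (List (String × String)) :=
  let res := data
  let res := match user with
    | none => res
    | some u => res.filter (fun item => (PySem.Dict.mk item).get? "User" == some u)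
  let res := match name with
    | none => res
    | some n => res.filter (fun item => ((PySem.Dict.mk item).get? "Name").map PySem.Str.lower == some (PySem.Str.lower n))
  let res := match arch with
    | none => res
    | some a => res.filter (fun item => (PySem.Dict.mk item).get? "Arch" == some a)
  res

-- ===== PORT B =====
-- B helper: the criteria table (key, lowercase-flag, target), built by appends.
def pvCriteria (user : Option String) (name : Option String) (arch : Option String) : List (String × Bool × String) :=
  (match user with | none => [] | some u => [("User", false, u)]) ++
  (match name with | none => [] | some n => [("Name", true, PySem.Str.lower n)]) ++
  (match arch with | none => [] | some a => [("Arch", false, a)])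

-- B helper: item satisfies every criterion of the table (checked in order).
def pvMatches (crit : List (String × Bool × String)) (item : List (String × String)) : Bool :=
  crit.all (fun c =>
    (if c.2.1 then ((PySem.Dict.mk item).get? c.1).map PySem.Str.lower
              else (PySem.Dict.mk item).get? c.1) == some c.2.2)

-- B: one accumulator loop over data, appending items that satisfy the table.
def filter_ps_results_alt (data : List (List (String × String))) (user : Option String) (name : Option String) (arch : Option String) : List (List (String × String)) :=
  let criteria := pvCriteria user name arch
  data.foldl (fun out item => if pvMatches criteria item then out ++ [item] else out) []

-- ===== PRECONDITION & SPEC =====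
-- Pre_ excludes exactly the inputs on which Python A raises KeyError: an item reached
-- by an active user/name/arch filter that lacks the corresponding key (an item dropped
-- by an earlier filter is never asked for the later keys, in A and B alike).
def Pre_filter_ps_results (data : List (List (String × String))) (user : Option String) (name : Option String) (arch : Option String) : Prop :=
  (∀ item ∈ data, user.isSome → ((PySem.Dict.mk item).get? "User").isSome) ∧
  (∀ item ∈ data, (∀ u, user = some u → (PySem.Dict.mk item).get? "User" = some u) →
      name.isSome → ((PySem.Dict.mk item).get? "Name").isSome) ∧
  (∀ item ∈ data, (∀ u, user = some u → (PySem.Dict.mk item).get? "User" = some u) →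
      (∀ n, name = some n → ((PySem.Dict.mk item).get? "Name").map PySem.Str.lower = some (PySem.Str.lower n)) →
      arch.isSome → ((PySem.Dict.mk item).get? "Arch").isSome)
instance (data : List (List (String × String))) (user : Option String) (name : Option String) (arch : Option String) : Decidable (Pre_filter_ps_results data user name arch) := by unfold Pre_filter_ps_results; infer_instance

def pvWitness_filter_ps_results : (List (List (String × String))) × Option String × Option String × Option String :=
  ([[("User", "root"), ("Name", "Init"), ("Arch", "x64")]], some "root", some "init", none)

def Spec_filter_ps_results (data : List (List (String × String))) (user : Option String) (name : Option String) (arch : Option String) (out : List (List (String × String))) : Prop := out = filter_ps_results_alt data user name arch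
instance (data : List (List (String × String))) (user : Option String) (name : Option String) (arch : Option String) (out : List (List (String × String))) : Decidable (Spec_filter_ps_results data user name arch out) := by unfold Spec_filter_ps_results; infer_instance

-- ===== CLAIM (what is proved, stated in full; the proofs are below) =====
def Claim_equal_filter_ps_results : Prop := ∀ (data : List (List (String × String))) (user : Option String) (name : Option String) (arch : Option String), Dom_filter_ps_results data user name arch → Pre_filter_ps_results data user name arch → Spec_filter_ps_results data user name arch (filter_ps_results data user name arch)

-- ===== LEMMAS AND PROOFS =====
theorem pvFilter2 {α : Type} (p q : α → Bool) (l : List α) :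
    (l.filter p).filter q = l.filter (fun a => p a && q a) := by
  induction l with
  | nil => rfl
  | cons x xs ih => cases hp : p x <;> cases hq : q x <;> simp [hp, hq, ih]

theorem pvMatches_nil : pvMatches [] = fun _ => true := funext fun _ => rfl

theorem pvMatches_cons (c : String × Bool × String) (crit : List (String × Bool × String)) :
    pvMatches (c :: crit) = fun item =>
      ((if c.2.1 then ((PySem.Dict.mk item).get? c.1).map PySem.Str.lower
                 else (PySem.Dict.mk item).get? c.1) == some c.2.2) && pvMatches crit item :=
  funext fun _ => by simp [pvMatches]

-- ===== VERDICT (by name: the statement is the Claim_ definition above) =====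
theorem filter_ps_results_spec : Claim_equal_filter_ps_results := by
  intro data user name arch _ _
  unfold Spec_filter_ps_results filter_ps_results filter_ps_results_alt
  rw [PySem.List.foldl_append_if_eq_filter]
  cases user <;> cases name <;> cases arch <;>
    simp only [pvCriteria, List.nil_append, List.append_nil, List.cons_append,
      pvMatches_nil, pvMatches_cons, pvFilter2, List.filter_true,
      Bool.false_eq_true, if_false, if_true, Bool.and_true, Bool.and_assoc]
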